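-- pv_equiv track=rewrite | github.com/sudo-vaibhav/leetcode-solutions | 2178-maximum-split-of-positive-even-integers/2178-maximum-split-of-positive-even-integers.py | maximumEvenSplit
-- ===== SOURCE A (Python) =====
-- from typing import List
--
-- def maximumEvenSplit(finalSum: int) -> List[int]:
--     prev = 0
--     f = finalSum
--     ans = []
--     if f%2==1: return []
--     while f>0:
--         now = prev+2
--         if f-now<=now:
--             ans.append(f)
--             f-=f
--         else:
--             ans.append(now)
--             f-=now
--         prev = now
--     return ans
-- ===== SOURCE B (Python) =====
-- from typing import List
--
-- def maximumEvenSplit(finalSum: int) -> List[int]: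
--     # closed-form construction: find k = max count of distinct evens, emit 2,4,...,2(k-1) and the remainder
--     if finalSum <= 0 or finalSum % 2 == 1:
--         return []
--     k = 1
--     while (k + 1) * (k + 2) <= finalSum:
--         k += 1
--     return list(range(2, 2 * k, 2)) + [finalSum - k * (k - 1)]
-- ===== Notes on version B (the rewrite author's own statement) =====
-- stated objective: alternative
-- what changed: B first determines the count k of parts (the largest k with k*(k+1) <= finalSum) and then emits the answer in closed form — the ascending even prefix via a single range call plus the remainder finalSum - k*(k-1) — instead of A's loop that appends candidates while repeatedly subtracting from the running sum.
import Mathlib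
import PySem

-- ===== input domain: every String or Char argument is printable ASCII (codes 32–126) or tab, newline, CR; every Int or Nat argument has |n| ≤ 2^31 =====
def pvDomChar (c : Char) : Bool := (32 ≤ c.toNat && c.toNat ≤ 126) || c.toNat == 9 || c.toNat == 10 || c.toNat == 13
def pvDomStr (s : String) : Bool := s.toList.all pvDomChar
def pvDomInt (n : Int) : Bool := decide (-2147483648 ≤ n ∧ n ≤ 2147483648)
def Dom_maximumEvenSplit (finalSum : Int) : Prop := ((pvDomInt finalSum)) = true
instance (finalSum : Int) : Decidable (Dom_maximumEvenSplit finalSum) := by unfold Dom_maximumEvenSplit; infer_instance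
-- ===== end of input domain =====

-- B replaces A's subtract-and-append loop by a direct computation of the number of parts k
-- and a closed-form list (range plus remainder); same O(√n) cost, different construction.

-- ===== PORT A =====
-- the while loop of A; fuel = finalSum.toNat suffices since f shrinks by ≥ 2 each turn
def pvLoopA : Nat → Int → Int → List Int → List Int
  | 0, _, _, ans => ans
  | Nat.succ fuel, prev, f, ans =>
    if f > 0 then
      let now := prev + 2
      if f - now ≤ now then ans ++ [f]
      else pvLoopA fuel now (f - now) (ans ++ [now])
    else ans

def maximumEvenSplit (finalSum : Int) : List Int :=
  if PySem.Int.mod finalSum 2 = 1 then []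
  else pvLoopA finalSum.toNat 0 finalSum []

-- ===== PORT B =====
-- the while loop of B that increments k while (k+1)*(k+2) <= finalSum
def pvFindK : Nat → Int → Int → Int
  | 0, k, _ => k
  | Nat.succ fuel, k, s => if (k + 1) * (k + 2) ≤ s then pvFindK fuel (k + 1) s else k

def maximumEvenSplit_alt (finalSum : Int) : List Int :=
  if finalSum ≤ 0 ∨ PySem.Int.mod finalSum 2 = 1 then []
  else
    let k := pvFindK finalSum.toNat 1 finalSum
    PySem.List.pyRange 2 (2 * k) 2 ++ [finalSum - k * (k - 1)]

-- ===== PRECONDITION & SPEC =====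
def Spec_maximumEvenSplit (finalSum : Int) (out : List Int) : Prop := out = maximumEvenSplit_alt finalSum
instance (finalSum : Int) (out : List Int) : Decidable (Spec_maximumEvenSplit finalSum out) := by unfold Spec_maximumEvenSplit; infer_instance

-- ===== CLAIM (what is proved, stated in full; the proofs are below) =====
def Claim_equal_maximumEvenSplit : Prop := ∀ (finalSum : Int), Dom_maximumEvenSplit finalSum → Spec_maximumEvenSplit finalSum (maximumEvenSplit finalSum)

-- ===== LEMMAS AND PROOFS =====

-- step-2 range, cons form
lemma pyRange2_cons (a b : Int) (h : a < b) :
    PySem.List.pyRange a b 2 = a :: PySem.List.pyRange (a + 2) b 2 := by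
  rw [PySem.List.pyRange_of_pos a b (by norm_num), PySem.List.pyRange_of_pos (a + 2) b (by norm_num)]
  rw [if_pos h]
  have hc : ((b - a + 2 - 1) / 2).toNat
      = (if a + 2 < b then ((b - (a + 2) + 2 - 1) / 2).toNat else 0) + 1 := by
    split <;> omega
  rw [hc, List.range_succ_eq_map, List.map_cons, List.map_map]
  have hf : ((fun k : Nat => a + 2 * (k : Int)) ∘ Nat.succ) = fun k : Nat => a + 2 + 2 * (k : Int) := by
    funext k; simp [Function.comp]; ring
  rw [hf]
  norm_num

lemma pyRange2_nil (a b : Int) (h : b ≤ a) : PySem.List.pyRange a b 2 = [] := by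
  rw [PySem.List.pyRange_of_pos a b (by norm_num), if_neg (by omega)]
  simp

-- the run of A's loop equals B's closed-form list, for the k characterised by k(k+1) ≤ s < (k+1)(k+2)
lemma loopA_run (d : Nat) : ∀ (s n : Int) (ans : List Int) (fuel : Nat),
    2 ∣ s → 1 ≤ n →
    (n + d) * (n + d + 1) ≤ s → s < (n + d + 1) * (n + d + 2) →
    (s - n * (n - 1)).toNat ≤ fuel →
    pvLoopA fuel (2 * (n - 1)) (s - n * (n - 1)) ans
      = ans ++ (PySem.List.pyRange (2 * n) (2 * (n + d)) 2 ++ [s - (n + d) * (n + d - 1)]) := by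
  induction d with
  | zero =>
    intro s n ans fuel h2 hn hk1 hk2 hf
    simp only [Nat.cast_zero, add_zero] at hk1 hk2 ⊢
    have hnn : n * (n + 1) = n * (n - 1) + 2 * n := by ring
    have hpos : 0 < s - n * (n - 1) := by nlinarith
    cases fuel with
    | zero => omega
    | succ fuel' =>
      have heven : 2 ∣ n * (n + 1) := (Int.even_mul_succ_self n).two_dvd
      have h2' : (n + 1) * (n + 2) = n * (n + 1) + 2 * (n + 1) := by ring
      have hstop : s - n * (n - 1) - (2 * (n - 1) + 2) ≤ 2 * (n - 1) + 2 := by omega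
      simp only [pvLoopA, if_pos hpos]
      rw [if_pos hstop]
      rw [pyRange2_nil _ _ (le_refl _)]
      simp
  | succ d ih =>
    intro s n ans fuel h2 hn hk1 hk2 hf
    push_cast at hk1 hk2
    have hd0 : (0:Int) ≤ (d:Int) := Nat.cast_nonneg d
    have hmono : (n + 1) * (n + 2) ≤ (n + ((d:Int) + 1)) * (n + ((d:Int) + 1) + 1) := by nlinarith
    have hrel : (n + 1) * (n + 2) = n * (n - 1) + 4 * n + 2 := by ring
    have hpos : 0 < s - n * (n - 1) := by omega
    cases fuel with
    | zero => omega
    | succ fuel' =>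
      have hnostop : ¬ (s - n * (n - 1) - (2 * (n - 1) + 2) ≤ 2 * (n - 1) + 2) := by omega
      simp only [pvLoopA, if_pos hpos]
      rw [if_neg hnostop]
      have hfix : (n + 1) * ((n + 1) - 1) = n * (n - 1) + 2 * n := by ring
      have hih := ih s (n + 1) (ans ++ [2 * (n + 1 - 1)]) fuel' h2 (by omega)
        (by have : n + 1 + (d:Int) = n + ((d:Int) + 1) := by ring
            rw [this]; exact hk1)
        (by have : n + 1 + (d:Int) = n + ((d:Int) + 1) := by ring
            rw [this]; exact hk2)
        (by omega)
      rw [show (2:Int) * (n - 1) + 2 = 2 * (n + 1 - 1) from by ring,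
          show s - n * (n - 1) - 2 * (n + 1 - 1) = s - (n + 1) * (n + 1 - 1) from by ring]
      rw [hih]
      push_cast
      have hlt : 2 * n < 2 * (n + ((d:Int) + 1)) := by omega
      rw [pyRange2_cons _ _ hlt]
      rw [show (2:Int) * n + 2 = 2 * (n + 1) from by ring,
          show n + ((d:Int) + 1) = n + 1 + (d:Int) from by ring]
      simp [List.append_assoc]

-- pvFindK returns the largest k with k(k+1) ≤ s (given enough fuel)
lemma findK_spec (fuel : Nat) : ∀ (k s : Int), 1 ≤ k → k * (k + 1) ≤ s → (s - k).toNat ≤ fuel →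
    1 ≤ pvFindK fuel k s ∧ (pvFindK fuel k s) * (pvFindK fuel k s + 1) ≤ s
      ∧ s < (pvFindK fuel k s + 1) * (pvFindK fuel k s + 2) := by
  induction fuel with
  | zero =>
    intro k s hk h1 hf
    exfalso
    nlinarith [Int.toNat_of_nonneg (show (0:Int) ≤ s - k by nlinarith)]
  | succ fuel ih =>
    intro k s hk h1 hf
    by_cases h : (k + 1) * (k + 2) ≤ s
    · have hsk : k < s := by nlinarith
      have h' : (k + 1) * ((k + 1) + 1) ≤ s := by
        rw [show (k + 1) + 1 = k + 2 from by ring]; exact h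
      have := ih (k + 1) s (by omega) h' (by omega)
      simpa [pvFindK, if_pos h] using this
    · simp only [pvFindK, if_neg h]
      exact ⟨hk, h1, by omega⟩

-- ===== VERDICT (by name: the statement is the Claim_ definition above) =====
theorem maximumEvenSplit_spec : Claim_equal_maximumEvenSplit := by
  intro s _
  unfold Spec_maximumEvenSplit maximumEvenSplit maximumEvenSplit_alt
  have hmod : PySem.Int.mod s 2 = s % 2 := PySem.Int.mod_eq_emod_of_pos (a := s) (b := 2) (by norm_num)
  by_cases hodd : s % 2 = 1
  · simp [hodd]
  · have h2 : 2 ∣ s := by omega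
    rw [hmod, if_neg hodd]
    by_cases hle : s ≤ 0
    · have : s.toNat = 0 := by omega
      rw [if_pos (Or.inl hle), this]
      simp [pvLoopA]
    · rw [if_neg (by simp [hodd]; omega)]
      have hs2 : 2 ≤ s := by omega
      obtain ⟨hk1, hk2, hk3⟩ := findK_spec s.toNat 1 s (le_refl _) (by omega) (by omega)
      set k := pvFindK s.toNat 1 s with hkdef
      have hkd : k = 1 + ((k - 1).toNat : Int) := by omega
      have := loopA_run (k - 1).toNat s 1 [] s.toNat h2 (le_refl _)
        (by rw [← hkd]; omega) (by rw [← hkd]; nlinarith [hk3]) (by omega)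
      rw [← hkd] at this
      simpa using this
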